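-- pv_equiv track=rewrite | github.com/RushabhShahPrograms/DSA_Python_Coding_Ninjas | 03_Recursion_Assignment/08_Check_AB.py | check_ab
-- ===== SOURCE A (Python) =====
-- def check_ab(s):
--     if not s:
--         return True
--
--     if s[0] == 'a':
--         return check_ab(s[1:])
--
--     elif s[:2] == 'bb':
--         return check_ab(s[2:])
--
--     else:
--         return False
-- ===== SOURCE B (Python) =====
-- def check_ab(s):
--     i, n = 0, len(s)
--     while i < n:
--         if s[i] == 'a':
--             i += 1
--         elif s[i] == 'b' and i + 1 < n and s[i + 1] == 'b':
--             i += 2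
--         else:
--             return False
--     return True
-- ===== Notes on version B (the rewrite author's own statement) =====
-- stated objective: faster
-- what changed: Replaced the slicing recursion (each call copies the remaining suffix) by a single iterative index scan over the string, no slices and no recursion.
import Mathlib
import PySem

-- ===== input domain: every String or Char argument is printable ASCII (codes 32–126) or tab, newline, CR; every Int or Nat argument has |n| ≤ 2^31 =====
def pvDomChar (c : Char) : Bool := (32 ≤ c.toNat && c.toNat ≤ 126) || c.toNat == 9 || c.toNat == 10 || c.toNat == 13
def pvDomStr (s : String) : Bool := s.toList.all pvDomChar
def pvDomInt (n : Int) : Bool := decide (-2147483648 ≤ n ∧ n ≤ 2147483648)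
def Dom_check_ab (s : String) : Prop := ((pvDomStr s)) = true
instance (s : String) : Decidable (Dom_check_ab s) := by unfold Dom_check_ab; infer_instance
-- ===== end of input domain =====

-- B replaces A's slicing recursion by a single iterative index scan (no slices, no recursion); a timing run measures the speed-up.

-- ===== PORT A =====
-- slicing recursion: s[1:] / s[2:] become List.drop
def check_ab_rec (l : List Char) : Bool :=
  match l with
  | [] => true
  | c :: rest =>
    if c = 'a' then check_ab_rec rest
    else if (c :: rest).take 2 = ['b', 'b'] then check_ab_rec (rest.drop 1)
    else false
termination_by l.length
decreasing_by all_goals (simp; try omega)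

def check_ab (s : String) : Bool := check_ab_rec s.toList

-- ===== PORT B =====
-- iterative index scan: while i < n, advance by 1 on 'a', by 2 on "bb", else False
def check_ab_alt_loop (l : List Char) (n : Nat) (i : Nat) : Bool :=
  if _h : i < n then
    if l.getD i ' ' = 'a' then check_ab_alt_loop l n (i + 1)
    else if l.getD i ' ' = 'b' ∧ i + 1 < n ∧ l.getD (i + 1) ' ' = 'b' then
      check_ab_alt_loop l n (i + 2)
    else false
  else true
termination_by n - i

def check_ab_alt (s : String) : Bool := check_ab_alt_loop s.toList s.toList.length 0

-- ===== PRECONDITION & SPEC =====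
def Spec_check_ab (s : String) (out : Bool) : Prop := out = check_ab_alt s
instance (s : String) (out : Bool) : Decidable (Spec_check_ab s out) := by unfold Spec_check_ab; infer_instance

-- ===== CLAIM (what is proved, stated in full; the proofs are below) =====
def Claim_equal_check_ab : Prop := ∀ (s : String), Dom_check_ab s → Spec_check_ab s (check_ab s)

-- ===== LEMMAS AND PROOFS =====

theorem check_ab_loop_eq_rec (l : List Char) (i : Nat) :
    check_ab_alt_loop l l.length i = check_ab_rec (l.drop i) := by
  by_cases h : i < l.length
  case neg =>
    rw [check_ab_alt_loop, check_ab_rec.eq_def]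
    simp [List.drop_eq_nil_of_le (by omega : l.length ≤ i), h]
  case pos =>
    have hdrop : l.drop i = l[i] :: l.drop (i + 1) := List.drop_eq_getElem_cons h
    rw [check_ab_alt_loop]
    simp only [h, dif_pos]
    rw [hdrop, check_ab_rec.eq_def]
    have hget : l.getD i ' ' = l[i] := List.getD_eq_getElem l ' ' h
    by_cases ha : l[i] = 'a'
    · simp only [hget, ha]
      exact check_ab_loop_eq_rec l (i + 1)
    · simp only [hget, ha, ite_false]
      -- compare the take-2 test with the indexed test
      by_cases h1 : i + 1 < l.length
      · have hdrop1 : l.drop (i + 1) = l[i + 1] :: l.drop (i + 2) :=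
          List.drop_eq_getElem_cons h1
        have hget1 : l.getD (i + 1) ' ' = l[i + 1] := List.getD_eq_getElem l ' ' h1
        rw [hdrop1]
        by_cases hb : l[i] = 'b' ∧ l[i + 1] = 'b'
        · have : (l[i] :: l[i + 1] :: l.drop (i + 2)).take 2 = ['b', 'b'] := by
            simp [hb.1, hb.2]
          have hrec := check_ab_loop_eq_rec l (i + 2)
          simp [hb.1, hb.2, h1, hrec]
        · have hne : (l[i] :: l[i + 1] :: l.drop (i + 2)).take 2 ≠ ['b', 'b'] := by
            simp only [List.take_succ_cons, List.take_succ_cons, List.take_zero]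
            intro hc
            exact hb ⟨by injection hc, by injection hc with _ hc2; injection hc2⟩
          simp only [if_neg hne, hget1]
          rw [if_neg]
          intro ⟨hb1, _, hb2⟩
          exact hb ⟨hb1, hb2⟩
      · have hnil : l.drop (i + 1) = [] := List.drop_eq_nil_of_le (by omega)
        rw [hnil]
        have hne : (l[i] :: ([] : List Char)).take 2 ≠ ['b', 'b'] := by simp
        simp only [if_neg hne]
        rw [if_neg]
        intro ⟨_, hlt, _⟩
        omega
termination_by l.length - i
decreasing_by all_goals omega

-- ===== VERDICT (by name: the statement is the Claim_ definition above) =====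
theorem check_ab_spec : Claim_equal_check_ab := by
  intro s _
  unfold Spec_check_ab check_ab check_ab_alt
  rw [check_ab_loop_eq_rec s.toList 0, List.drop_zero]
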